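-- pv_equiv track=rewrite | github.com/KushnirDmytro/AI_HW4 | CSP_my_personal_scedule.py | daily_overtime
-- ===== SOURCE A (Python) =====
-- study_activities = ['AI',
--                     'IoT',
--                     'Ethics'
--                     'WEB',
--                     'Projects',
--                     'DS_club',
--                     'ALGO_club']
--
-- def daily_overtime(partial_assignment, coef):
--     whole_day_study_time = 0
--     previous_time_slot = (0, 0)  # init value
--     overtime = 0
--     for t_s in partial_assignment:
--         this_time_slot = partial_assignment[t_s]
--
--         # checking for natural breaks in timeline
--         if t_s[0] != previous_time_slot[0]:  # if day changed
--             whole_day_study_time = 0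
--
--         if this_time_slot in study_activities:
--             whole_day_study_time += 1
--         if (t_s[0] < 5 and (whole_day_study_time > 4)) or (whole_day_study_time > 8):
--             overtime += 1
--         previous_time_slot = t_s  # memorising after processing
--
--     return -overtime * coef
-- ===== SOURCE B (Python) =====
-- study_activities = ['AI',
--                     'IoT',
--                     'Ethics'
--                     'WEB',
--                     'Projects',
--                     'DS_club',
--                     'ALGO_club']
--
-- def daily_overtime(partial_assignment, coef):
--     # Split the schedule into consecutive same-day runs, then score each run.
--     runs = []
--     for key, activity in partial_assignment.items():
--         if runs and runs[-1][0] == key[0]: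
--             runs[-1][1].append(activity)
--         else:
--             runs.append((key[0], [activity]))
--     overtime = 0
--     for day, activities in runs:
--         studied = 0
--         for activity in activities:
--             if activity in study_activities:
--                 studied += 1
--             if (day < 5 and studied > 4) or (studied > 8):
--                 overtime += 1
--     return -overtime * coef
-- ===== Notes on version B (the rewrite author's own statement) =====
-- stated objective: idiomatic
-- what changed: B first splits the schedule into consecutive same-day runs and then scores each run with a fresh counter, instead of A's single pass that carries a previous-slot register, resets the counter on day change, and re-looks each key up in the dict.
import Mathlib
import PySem

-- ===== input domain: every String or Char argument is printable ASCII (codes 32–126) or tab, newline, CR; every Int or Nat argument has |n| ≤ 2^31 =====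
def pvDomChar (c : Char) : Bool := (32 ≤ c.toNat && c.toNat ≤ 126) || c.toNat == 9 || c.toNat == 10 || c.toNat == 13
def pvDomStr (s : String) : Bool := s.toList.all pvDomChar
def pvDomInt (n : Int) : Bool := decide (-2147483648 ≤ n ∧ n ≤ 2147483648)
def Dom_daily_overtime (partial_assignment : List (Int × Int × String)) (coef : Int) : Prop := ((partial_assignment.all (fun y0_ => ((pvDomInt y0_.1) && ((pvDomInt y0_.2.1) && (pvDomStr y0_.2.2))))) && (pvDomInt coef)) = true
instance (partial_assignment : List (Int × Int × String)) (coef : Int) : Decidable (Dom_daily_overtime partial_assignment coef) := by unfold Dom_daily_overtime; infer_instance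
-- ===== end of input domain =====

-- B splits the schedule into consecutive same-day runs and scores each run with a
-- fresh counter (idiomatic decomposition); A makes one pass carrying a previous-slot
-- register and re-looks each key up in the dict. Same cost, same results.


-- ===== PORT A =====
-- module-level constant (note the missing comma in the source: 'Ethics' 'WEB' concatenates)
def study_activities : List String := ["AI", "IoT", "EthicsWEB", "Projects", "DS_club", "ALGO_club"]

-- partial_assignment[t_s]: first match on the (day, hour) key; exact for the dict A
-- receives because a dict's keys (guaranteed by Pre_) are unique, so the key looked up
-- while iterating is always present ("" is unreachable).
def pvLookupA (pa : List (Int × Int × String)) (d h : Int) : String :=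
  match pa with
  | [] => ""
  | (d', h', v) :: rest => if d' = d ∧ h' = h then v else pvLookupA rest d h

-- the for-loop of A, state = (whole_day_study_time, previous_time_slot, overtime)
def pvLoopA (pa : List (Int × Int × String)) (wds : Int) (prev : Int × Int) (ot : Int) :
    List (Int × Int × String) → Int
  | [] => ot
  | (d, h, _) :: rest =>
    let this_time_slot := pvLookupA pa d h
    let wds1 := if d ≠ prev.1 then 0 else wds
    let wds2 := if this_time_slot ∈ study_activities then wds1 + 1 else wds1
    let ot1 := if (d < 5 ∧ wds2 > 4) ∨ wds2 > 8 then ot + 1 else ot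
    pvLoopA pa wds2 (d, h) ot1 rest

def daily_overtime (partial_assignment : List (Int × Int × String)) (coef : Int) : Int :=
  -(pvLoopA partial_assignment 0 (0, 0) 0 partial_assignment) * coef

-- ===== PORT B =====
-- runs[-1] update / append of Source B's run-building loop
def pvAddSlot (runs : List (Int × List String)) (day : Int) (act : String) :
    List (Int × List String) :=
  match runs.getLast? with
  | some (d, acts) =>
      if d = day then runs.dropLast ++ [(d, acts ++ [act])] else runs ++ [(day, [act])]
  | none => [(day, [act])]

-- first loop of Source B: build the consecutive same-day runs
def pvBuildRuns (runs : List (Int × List String)) : List (Int × Int × String) → List (Int × List String)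
  | [] => runs
  | (d, _, v) :: rest => pvBuildRuns (pvAddSlot runs d v) rest

-- inner loop of Source B: score one run, state = (studied, overtime)
def pvScoreActs (day : Int) (st : Int × Int) : List String → Int × Int
  | [] => st
  | act :: rest =>
    let studied := if act ∈ study_activities then st.1 + 1 else st.1
    let ot := if (day < 5 ∧ studied > 4) ∨ studied > 8 then st.2 + 1 else st.2
    pvScoreActs day (studied, ot) rest

-- outer scoring loop of Source B
def pvScoreRuns (ot : Int) : List (Int × List String) → Int
  | [] => ot
  | (day, acts) :: rest => pvScoreRuns (pvScoreActs day (0, ot) acts).2 rest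

def daily_overtime_alt (partial_assignment : List (Int × Int × String)) (coef : Int) : Int :=
  let runs := pvBuildRuns [] partial_assignment;
  -(pvScoreRuns 0 runs) * coef

-- ===== PRECONDITION & SPEC =====
-- Pre_ excludes association lists with duplicate (day, hour) keys: a Python dict cannot
-- contain them (the runner's dict collapses them), so which value a port picks there is
-- an artefact of the list representation.
def Pre_daily_overtime (partial_assignment : List (Int × Int × String)) (coef : Int) : Prop :=
  (partial_assignment.map (fun e => (e.1, e.2.1))).Nodup

instance (partial_assignment : List (Int × Int × String)) (coef : Int) : Decidable (Pre_daily_overtime partial_assignment coef) := by unfold Pre_daily_overtime; infer_instance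

def pvWitness_daily_overtime : (List (Int × Int × String)) × Int :=
  ([(0, 0, "AI"), (0, 1, "IoT"), (1, 0, "rest")], 3)

def Spec_daily_overtime (partial_assignment : List (Int × Int × String)) (coef : Int) (out : Int) : Prop := out = daily_overtime_alt partial_assignment coef
instance (partial_assignment : List (Int × Int × String)) (coef : Int) (out : Int) : Decidable (Spec_daily_overtime partial_assignment coef out) := by unfold Spec_daily_overtime; infer_instance

-- ===== CLAIM (what is proved, stated in full; the proofs are below) =====
def Claim_equal_daily_overtime : Prop := ∀ (partial_assignment : List (Int × Int × String)) (coef : Int), Dom_daily_overtime partial_assignment coef → Pre_daily_overtime partial_assignment coef → Spec_daily_overtime partial_assignment coef (daily_overtime partial_assignment coef)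

-- ===== LEMMAS AND PROOFS =====

theorem daily_overtime_witness_ok :
    Dom_daily_overtime pvWitness_daily_overtime.1 pvWitness_daily_overtime.2 ∧
    Pre_daily_overtime pvWitness_daily_overtime.1 pvWitness_daily_overtime.2 := by
  constructor <;> decide

-- reference shape of the runs built by Source B's first loop
def pvConsume (d : Int) (acts : List String) : List (Int × Int × String) → List (Int × List String)
  | [] => [(d, acts)]
  | (d', _, v) :: rest =>
    if d' = d then pvConsume d (acts ++ [v]) rest
    else (d, acts) :: pvConsume d' [v] rest

-- A's loop with the lookup replaced by the element's own value
def pvLoopA' (wds : Int) (pd : Int) (ot : Int) : List (Int × Int × String) → Int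
  | [] => ot
  | (d, _, v) :: rest =>
    let wds1 := if d ≠ pd then 0 else wds
    let wds2 := if v ∈ study_activities then wds1 + 1 else wds1
    let ot1 := if (d < 5 ∧ wds2 > 4) ∨ wds2 > 8 then ot + 1 else ot
    pvLoopA' wds2 d ot1 rest

theorem pvLookupA_eq_of_nodup (pa : List (Int × Int × String))
    (hnd : (pa.map (fun e => (e.1, e.2.1))).Nodup) :
    ∀ d h v, (d, h, v) ∈ pa → pvLookupA pa d h = v := by
  induction pa with
  | nil => intro d h v hm; cases hm
  | cons x rest ih =>
    obtain ⟨xd, xh, xv⟩ := x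
    simp only [List.map_cons, List.nodup_cons] at hnd
    intro d h v hm
    simp only [pvLookupA]
    by_cases hk : xd = d ∧ xh = h
    · rw [if_pos hk]
      rcases List.mem_cons.1 hm with h1 | h1
      · cases h1; rfl
      · exfalso
        obtain ⟨e1, e2⟩ := hk
        subst e1; subst e2
        exact hnd.1 (List.mem_map.2 ⟨(xd, xh, v), h1, rfl⟩)
    · rw [if_neg hk]
      rcases List.mem_cons.1 hm with h1 | h1
      · exfalso
        injection h1 with e1 e2; injection e2 with e2 e3
        exact hk ⟨e1.symm, e2.symm⟩
      · exact ih hnd.2 d h v h1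

-- on a Nodup-keyed list, A's loop computes pvLoopA' (only the previous DAY matters)
theorem pvLoopA_eq_loopA' (pa : List (Int × Int × String))
    (hnd : (pa.map (fun e => (e.1, e.2.1))).Nodup) :
    ∀ (xs : List (Int × Int × String)), (∀ e ∈ xs, e ∈ pa) →
    ∀ wds pd ph ot, pvLoopA pa wds (pd, ph) ot xs = pvLoopA' wds pd ot xs := by
  intro xs
  induction xs with
  | nil => intro _ wds pd ph ot; rfl
  | cons x rest ih =>
    obtain ⟨d, h, v⟩ := x
    intro hsub wds pd ph ot
    have hv : pvLookupA pa d h = v :=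
      pvLookupA_eq_of_nodup pa hnd d h v (hsub _ (List.mem_cons_self))
    simp only [pvLoopA, pvLoopA', hv]
    exact ih (fun e he => hsub e (List.mem_cons_of_mem _ he)) _ _ _ _

theorem pvAddSlot_concat (rs : List (Int × List String)) (d : Int) (acts : List String)
    (day : Int) (act : String) :
    pvAddSlot (rs ++ [(d, acts)]) day act =
      if d = day then rs ++ [(d, acts ++ [act])] else rs ++ [(d, acts)] ++ [(day, [act])] := by
  simp only [pvAddSlot, List.getLast?_concat, List.dropLast_concat, List.append_assoc]

theorem pvBuildRuns_concat (xs : List (Int × Int × String)) :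
    ∀ (rs : List (Int × List String)) (d : Int) (acts : List String),
    pvBuildRuns (rs ++ [(d, acts)]) xs = rs ++ pvConsume d acts xs := by
  induction xs with
  | nil => intro rs d acts; rfl
  | cons x rest ih =>
    obtain ⟨d', h', v⟩ := x
    intro rs d acts
    simp only [pvBuildRuns, pvConsume, pvAddSlot_concat]
    by_cases hd : d = d'
    · subst hd
      rw [if_pos rfl, if_pos rfl, ih]
    · rw [if_neg hd, if_neg (fun h => hd h.symm)]
      have := ih (rs ++ [(d, acts)]) d' [v]
      simpa [List.append_assoc] using this

-- scoring one run is compositional in its activity list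
theorem pvScoreActs_append (day : Int) (acts1 acts2 : List String) :
    ∀ st, pvScoreActs day st (acts1 ++ acts2) = pvScoreActs day (pvScoreActs day st acts1) acts2 := by
  induction acts1 with
  | nil => intro st; rfl
  | cons a rest ih => intro st; simp only [List.cons_append, pvScoreActs]; exact ih _

-- master lemma: scoring the runs pvConsume builds = A's direct loop
theorem pvScore_consume (xs : List (Int × Int × String)) :
    ∀ (d : Int) (acts : List String) (ot : Int),
    pvScoreRuns ot (pvConsume d acts xs) =
      pvLoopA' (pvScoreActs d (0, ot) acts).1 d (pvScoreActs d (0, ot) acts).2 xs := by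
  induction xs with
  | nil =>
    intro d acts ot
    simp only [pvConsume, pvScoreRuns, pvLoopA']
  | cons x rest ih =>
    obtain ⟨d', h', v⟩ := x
    intro d acts ot
    simp only [pvConsume]
    by_cases hd : d' = d
    · subst hd
      rw [if_pos, ih (acts := acts ++ [v]), pvScoreActs_append]
      · simp [pvScoreActs, pvLoopA']
      · rfl
    · rw [if_neg hd]
      simp only [pvScoreRuns]
      rw [ih (acts := [v])]
      simp [pvScoreActs, pvLoopA', hd]

-- ===== VERDICT (by name: the statement is the Claim_ definition above) =====
theorem daily_overtime_spec : Claim_equal_daily_overtime := by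
  intro pa coef _hdom hpre
  unfold Spec_daily_overtime daily_overtime daily_overtime_alt
  have hloop : pvLoopA pa 0 (0, 0) 0 pa = pvScoreRuns 0 (pvBuildRuns [] pa) := by
    cases pa with
    | nil => rfl
    | cons x rest =>
      obtain ⟨d, h, v⟩ := x
      have hA := pvLoopA_eq_loopA' ((d, h, v) :: rest) hpre ((d, h, v) :: rest)
        (fun e he => he) 0 0 0 0
      rw [hA]
      have hruns : pvBuildRuns [] ((d, h, v) :: rest) = pvConsume d [v] rest := by
        have h2 : pvBuildRuns ([] ++ [(d, [v])]) rest = [] ++ pvConsume d [v] rest :=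
          pvBuildRuns_concat rest [] d [v]
        simpa [pvBuildRuns, pvAddSlot] using h2
      rw [hruns, pvScore_consume]
      simp [pvScoreActs, pvLoopA']
  rw [hloop]
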